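-- pv_equiv track=rewrite | github.com/fetchcord/FetchCord | fetch_cord/checks.py | get_win_gpu
-- ===== SOURCE A (Python) =====
-- def get_win_gpu(nvidiagpuline, radgpuline, intelgpuline):
--     gpuinfo = ""
--     gpuvendor = ""
--     if nvidiagpuline:
--         try:
--             gpuinfo += "GPU: " +  nvidiagpuline[0]
--             for n in nvidiagpuline[1:]:
--                 gpuinfo += "\nGPU: " + n
--
--             gpuvendor += nvidiagpuline[0].split()[0]
--         except IndexError:
--             pass
--     if radgpuline:
--         try:
--             if nvidiagpuline:
--                 gpuinfo += "\n"
--                 gpuinfo += "GPU: " + radgpuline[0]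
--             for r in radgpuline[1:]:
--                 gpuinfo += "\nGPU: " + r
--
--             gpuvendor += "AMD"
--         except IndexError:
--             pass
--     if intelgpuline:
--         try:
--             if nvidiagpuline or radgpuline:
--                 gpuinfo += "\n"
--             gpuinfo += "GPU: " + intelgpuline[0]
--             for i in intelgpuline[1:]:
--                 gpuinfo += "\nGPU: " + i
--
--             gpuvendor += "Intel"
--         except IndexError:
--             pass
--
--     return gpuinfo, gpuvendor
-- ===== SOURCE B (Python) =====
-- def get_win_gpu(nvidiagpuline, radgpuline, intelgpuline):
--     lines = []
--     for lst in (nvidiagpuline, radgpuline, intelgpuline):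
--         lines.extend("GPU: " + x for x in lst)
--     gpuvendor = ""
--     if nvidiagpuline:
--         parts = nvidiagpuline[0].split()
--         if parts:
--             gpuvendor += parts[0]
--     if radgpuline:
--         gpuvendor += "AMD"
--     if intelgpuline:
--         gpuvendor += "Intel"
--     return "\n".join(lines), gpuvendor
-- ===== Notes on version B (the rewrite author's own statement) =====
-- stated objective: idiomatic
-- what changed: B builds one flat list of 'GPU: ' lines from the three inputs and emits '\n'.join(lines), replacing A's string accumulator with its per-block conditional inter-block-newline branches; the vendor string is assembled separately with a guard replicating A's swallowed IndexError on a whitespace-only first nvidia line.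
-- intended difference: When nvidiagpuline is empty and radgpuline is non-empty, A returns gpuinfo without 'GPU: ' + radgpuline[0] (that append is nested under 'if nvidiagpuline:') and with a stray leading newline before the remaining rad lines, while B lists every GPU line; B's is the evidently intended output. — e.g. on get_win_gpu([], ["R"], []): A returns ("", "AMD"), B returns ("GPU: R", "AMD")
import Mathlib
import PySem

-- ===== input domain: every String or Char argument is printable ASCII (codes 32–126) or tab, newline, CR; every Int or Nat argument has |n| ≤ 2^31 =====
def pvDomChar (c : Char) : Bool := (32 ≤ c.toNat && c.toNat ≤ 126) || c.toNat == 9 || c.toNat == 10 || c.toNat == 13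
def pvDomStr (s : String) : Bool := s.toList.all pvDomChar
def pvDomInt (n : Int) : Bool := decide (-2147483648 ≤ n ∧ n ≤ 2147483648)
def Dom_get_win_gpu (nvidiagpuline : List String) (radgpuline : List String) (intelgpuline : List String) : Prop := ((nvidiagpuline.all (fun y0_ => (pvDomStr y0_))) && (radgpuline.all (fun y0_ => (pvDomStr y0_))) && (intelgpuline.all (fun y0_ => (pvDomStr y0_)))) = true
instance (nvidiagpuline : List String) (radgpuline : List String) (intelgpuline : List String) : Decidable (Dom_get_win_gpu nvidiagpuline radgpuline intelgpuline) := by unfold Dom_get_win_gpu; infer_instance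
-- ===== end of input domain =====

-- B is more idiomatic: it builds one flat list of "GPU: " lines and joins with "\n" (no conditional
-- inter-block newline bookkeeping); where A silently drops radgpuline[0] (see D_ below) B emits it.


-- ===== PORT A =====
-- A's `try` blocks only ever see an IndexError from `nvidiagpuline[0].split()[0]` (when split()
-- is empty); the gpuinfo appends before it are kept, so that `except: pass` is the [] match arm.
def get_win_gpu (nvidiagpuline : List String) (radgpuline : List String) (intelgpuline : List String) : String × String :=
  let gpuinfo : String := ""
  let gpuvendor : String := ""
  -- nvidia block
  let st1 : String × String :=
    match nvidiagpuline with
    | [] => (gpuinfo, gpuvendor)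
    | n0 :: nrest =>
      let gpuinfo := gpuinfo ++ ("GPU: " ++ n0)
      let gpuinfo := nrest.foldl (fun acc n => acc ++ ("\nGPU: " ++ n)) gpuinfo
      match PySem.Str.split₀ n0 with
      | [] => (gpuinfo, gpuvendor)              -- split()[0] raised IndexError, caught: pass
      | w :: _ => (gpuinfo, gpuvendor ++ w)
  -- radeon block (radgpuline[0] is only appended under `if nvidiagpuline:`)
  let st2 : String × String :=
    match radgpuline with
    | [] => st1
    | r0 :: rrest =>
      let gpuinfo :=
        if nvidiagpuline = [] then st1.1
        else st1.1 ++ "\n" ++ ("GPU: " ++ r0)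
      let gpuinfo := rrest.foldl (fun acc r => acc ++ ("\nGPU: " ++ r)) gpuinfo
      (gpuinfo, st1.2 ++ "AMD")
  -- intel block
  match intelgpuline with
  | [] => st2
  | i0 :: irest =>
    let gpuinfo := if nvidiagpuline = [] ∧ radgpuline = [] then st2.1 else st2.1 ++ "\n"
    let gpuinfo := gpuinfo ++ ("GPU: " ++ i0)
    let gpuinfo := irest.foldl (fun acc i => acc ++ ("\nGPU: " ++ i)) gpuinfo
    (gpuinfo, st2.2 ++ "Intel")

-- ===== PORT B =====
def get_win_gpu_alt (nvidiagpuline : List String) (radgpuline : List String) (intelgpuline : List String) : String × String :=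
  let lines : List String :=
    nvidiagpuline.map (fun x => "GPU: " ++ x)
    ++ radgpuline.map (fun x => "GPU: " ++ x)
    ++ intelgpuline.map (fun x => "GPU: " ++ x)
  let gpuvendor : String := ""
  let gpuvendor :=
    match nvidiagpuline with
    | [] => gpuvendor
    | n0 :: _ =>
      match PySem.Str.split₀ n0 with          -- parts = nvidiagpuline[0].split(); if parts: …
      | [] => gpuvendor
      | w :: _ => gpuvendor ++ w
  let gpuvendor := if radgpuline = [] then gpuvendor else gpuvendor ++ "AMD"
  let gpuvendor := if intelgpuline = [] then gpuvendor else gpuvendor ++ "Intel"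
  (PySem.Str.join "\n" lines, gpuvendor)

-- ===== PRECONDITION & SPEC =====
-- When nvidiagpuline is empty and radgpuline is not, A's gpuinfo omits "GPU: " + radgpuline[0]
-- (that append sits inside `if nvidiagpuline:`) and the remaining rad lines start with a stray
-- newline; B lists every GPU line, which is the evidently intended output.
def D_get_win_gpu (nvidiagpuline : List String) (radgpuline : List String) (intelgpuline : List String) : Prop :=
  nvidiagpuline = [] ∧ radgpuline ≠ []
instance (nvidiagpuline : List String) (radgpuline : List String) (intelgpuline : List String) : Decidable (D_get_win_gpu nvidiagpuline radgpuline intelgpuline) := by unfold D_get_win_gpu; infer_instance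

def Spec_get_win_gpu (nvidiagpuline : List String) (radgpuline : List String) (intelgpuline : List String) (out : String × String) : Prop := ¬ D_get_win_gpu nvidiagpuline radgpuline intelgpuline → out = get_win_gpu_alt nvidiagpuline radgpuline intelgpuline
instance (nvidiagpuline : List String) (radgpuline : List String) (intelgpuline : List String) (out : String × String) : Decidable (Spec_get_win_gpu nvidiagpuline radgpuline intelgpuline out) := by unfold Spec_get_win_gpu; infer_instance

def pvDiffWitness_get_win_gpu : List String × List String × List String := ([], ["R"], [])
def pvDiffWitnessOut_get_win_gpu : (String × String) × (String × String) := (("", "AMD"), ("GPU: R", "AMD"))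

-- ===== CLAIM (what is proved, stated in full; the proofs are below) =====
def Claim_unchanged_get_win_gpu : Prop := ∀ (nvidiagpuline : List String) (radgpuline : List String) (intelgpuline : List String), Dom_get_win_gpu nvidiagpuline radgpuline intelgpuline → Spec_get_win_gpu nvidiagpuline radgpuline intelgpuline (get_win_gpu nvidiagpuline radgpuline intelgpuline)
def Claim_changed_get_win_gpu : Prop := Dom_get_win_gpu (pvDiffWitness_get_win_gpu.1) (pvDiffWitness_get_win_gpu.2.1) (pvDiffWitness_get_win_gpu.2.2) ∧ D_get_win_gpu (pvDiffWitness_get_win_gpu.1) (pvDiffWitness_get_win_gpu.2.1) (pvDiffWitness_get_win_gpu.2.2) ∧ get_win_gpu (pvDiffWitness_get_win_gpu.1) (pvDiffWitness_get_win_gpu.2.1) (pvDiffWitness_get_win_gpu.2.2) = pvDiffWitnessOut_get_win_gpu.1 ∧ get_win_gpu_alt (pvDiffWitness_get_win_gpu.1) (pvDiffWitness_get_win_gpu.2.1) (pvDiffWitness_get_win_gpu.2.2) = pvDiffWitnessOut_get_win_gpu.2 ∧ pvDiffWitnessOut_get_win_gpu.1 ≠ pvDiffWitnessOut_get_win_g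pu.2
def Claim_exact_get_win_gpu : Prop := ∀ (nvidiagpuline : List String) (radgpuline : List String) (intelgpuline : List String), Dom_get_win_gpu nvidiagpuline radgpuline intelgpuline → D_get_win_gpu nvidiagpuline radgpuline intelgpuline → get_win_gpu nvidiagpuline radgpuline intelgpuline ≠ get_win_gpu_alt nvidiagpuline radgpuline intelgpuline

-- ===== LEMMAS AND PROOFS =====

-- the string A's inner `for` loops append for a tail list t
def pvT (t : List String) : String := t.foldr (fun n acc => ("\nGPU: " ++ n) ++ acc) ""
-- the string "\n".join prepends a (nonempty) head with
def pvS (t : List String) : String := t.foldr (fun n acc => ("\n" ++ n) ++ acc) ""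

theorem pvT_cons (a : String) (l : List String) : pvT (a :: l) = ("\nGPU: " ++ a) ++ pvT l := rfl

theorem pvFoldA (t : List String) (s : String) :
    t.foldl (fun acc n => acc ++ ("\nGPU: " ++ n)) s = s ++ pvT t := by
  induction t generalizing s with
  | nil => simp [pvT]
  | cons h t ih => simp [pvT, ih, String.append_assoc]

theorem pvJoinCons (a : String) (rest : List String) :
    PySem.Str.join "\n" (a :: rest) = a ++ pvS rest := by
  induction rest generalizing a with
  | nil =>
      apply String.toList_inj.mp
      simp [pvS, PySem.Str.join, PySem.Chars.join_singleton]
  | cons b r ih =>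
      apply String.toList_inj.mp
      have h2 := congrArg String.toList (ih b)
      simp [PySem.Str.join, PySem.Chars.join_cons_cons, pvS] at *
      simp [h2]

theorem pvS_cons (a : String) (l : List String) : pvS (a :: l) = ("\n" ++ a) ++ pvS l := rfl

theorem pvS_append (l1 l2 : List String) : pvS (l1 ++ l2) = pvS l1 ++ pvS l2 := by
  induction l1 with
  | nil => apply String.toList_inj.mp; simp [pvS]
  | cons h t ih =>
      apply String.toList_inj.mp
      have h2 := congrArg String.toList ih
      simp [pvS] at *
      simp [h2]

theorem pvS_map (l : List String) : pvS (l.map (fun x => "GPU: " ++ x)) = pvT l := by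
  induction l with
  | nil => rfl
  | cons h t ih =>
      apply String.toList_inj.mp
      have h2 := congrArg String.toList ih
      simp [pvS, pvT] at *
      simp [h2]

theorem pvMain (nv rad intel : List String) (hD : ¬ (nv = [] ∧ rad ≠ [])) :
    get_win_gpu nv rad intel = get_win_gpu_alt nv rad intel := by
  rcases nv with _ | ⟨n0, nt⟩ <;> rcases rad with _ | ⟨r0, rt⟩ <;> rcases intel with _ | ⟨i0, it⟩
  · rfl
  · simp [get_win_gpu, get_win_gpu_alt, pvFoldA, pvJoinCons, pvS_map, String.append_assoc]
  · exact absurd ⟨rfl, by simp⟩ hD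
  · exact absurd ⟨rfl, by simp⟩ hD
  all_goals {
    simp only [get_win_gpu, get_win_gpu_alt, pvFoldA]
    try rcases PySem.Str.split₀ n0 with _ | ⟨w, ws⟩
    all_goals simp [pvJoinCons, pvS_cons, pvS_append, pvS_map, String.append_assoc]
  }

-- ===== VERDICT (by name: the statement is the Claim_ definition above) =====
theorem get_win_gpu_spec : Claim_unchanged_get_win_gpu := by
  intro nv rad intel _
  unfold Spec_get_win_gpu
  intro hD
  exact pvMain nv rad intel hD
theorem get_win_gpu_changed : Claim_changed_get_win_gpu := by unfold Claim_changed_get_win_gpu; decide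
theorem get_win_gpu_tight : Claim_exact_get_win_gpu := by
  intro nv rad intel _ hD
  obtain ⟨h1, h2⟩ := hD
  subst h1
  rcases rad with _ | ⟨r0, rt⟩
  · exact absurd rfl h2
  intro heq
  have hh := congrArg (fun p => p.1.toList) heq
  rcases intel with _ | ⟨i0, it⟩ <;> rcases rt with _ | ⟨r1, rt'⟩ <;>
    simp only [get_win_gpu, get_win_gpu_alt, pvFoldA, pvT_cons] at hh <;>
    simp [pvJoinCons, pvS_cons, pvS_append, pvS_map, String.append_assoc, pvT] at hh
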